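-- pv_equiv track=rewrite | github.com/monyas96/NLP-4-VNRs | Trail 2 - code I wrote.py | categorize_sentence
-- ===== SOURCE A (Python) =====
-- def categorize_sentence(sentence,sdg_keywords_expanded, paradox_keywords_expanded):
--     sdg_code = None
--     paradox_code = None
--
--     for sdg, keywords in sdg_keywords_expanded.items():
--         if any(keyword in sentence.lower() for keyword in keywords):
--             sdg_code = sdg
--             break
--
--     for paradox, keywords in paradox_keywords_expanded.items():
--         if any(keyword in sentence.lower() for keyword in keywords):
--             paradox_code = paradox
--             break
--
--     return sdg_code, paradox_code
-- ===== SOURCE B (Python) =====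
-- def categorize_sentence(sentence, sdg_keywords_expanded, paradox_keywords_expanded):
--     low = sentence.lower()
--
--     def pick(table):
--         # flatten to (dict-position, keyword) pairs, keep positions of matched
--         # keywords, and return the code at the smallest matched position
--         flat = [(i, kw) for i, kws in enumerate(table.values()) for kw in kws]
--         hits = [i for i, kw in flat if kw in low]
--         if not hits:
--             return None
--         return list(table)[min(hits)]
--
--     return pick(sdg_keywords_expanded), pick(paradox_keywords_expanded)
-- ===== Notes on version B (the rewrite author's own statement) =====
-- stated objective: alternative
-- what changed: B replaces A's per-code first-match loops with early break by a flatten/filter/argmin pass: it flattens each dict to (position, keyword) pairs, collects the positions of all keywords contained in the lowered sentence, and returns the code at the minimal matched position.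
import Mathlib
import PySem

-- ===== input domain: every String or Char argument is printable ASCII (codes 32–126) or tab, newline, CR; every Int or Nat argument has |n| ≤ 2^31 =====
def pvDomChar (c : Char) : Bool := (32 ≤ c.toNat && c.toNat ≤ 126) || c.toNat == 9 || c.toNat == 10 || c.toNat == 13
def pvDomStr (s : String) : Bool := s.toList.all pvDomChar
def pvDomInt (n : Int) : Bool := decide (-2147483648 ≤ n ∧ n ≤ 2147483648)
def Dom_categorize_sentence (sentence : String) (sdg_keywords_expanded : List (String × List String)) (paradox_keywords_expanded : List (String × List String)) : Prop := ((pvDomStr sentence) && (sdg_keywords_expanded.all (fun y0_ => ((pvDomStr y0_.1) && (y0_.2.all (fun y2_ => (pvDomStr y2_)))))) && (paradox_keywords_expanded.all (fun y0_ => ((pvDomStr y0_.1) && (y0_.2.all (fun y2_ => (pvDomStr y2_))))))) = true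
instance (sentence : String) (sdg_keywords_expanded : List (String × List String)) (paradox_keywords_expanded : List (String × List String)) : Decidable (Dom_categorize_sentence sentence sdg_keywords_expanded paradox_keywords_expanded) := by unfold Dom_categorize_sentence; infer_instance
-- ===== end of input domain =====

-- B replaces A's first-match-with-break scans by a flatten/filter/argmin pass:
-- flatten each dict to (position, keyword) pairs, keep the positions of matched
-- keywords, and return the code at the smallest matched position (alternative
-- decomposition, same cost).

-- ===== PORT A =====
-- A's 'for code, kws in table.items(): if any(kw in sentence.lower() for kw in kws): x = code; break'
def pvLoopA (sentence : String) : List (String × List String) → Option String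
  | [] => none
  | (code, kws) :: rest =>
      if kws.any (fun kw => PySem.Str.isIn kw (PySem.Str.lower sentence)) then some code
      else pvLoopA sentence rest

def categorize_sentence (sentence : String) (sdg_keywords_expanded : List (String × List String)) (paradox_keywords_expanded : List (String × List String)) : Option String × Option String :=
  (pvLoopA sentence sdg_keywords_expanded, pvLoopA sentence paradox_keywords_expanded)

-- ===== PORT B =====
-- pick(table): flat = [(i, kw) for i, kws in enumerate(table.values()) for kw in kws];
-- hits = [i for i, kw in flat if kw in low]; None if not hits else list(table)[min(hits)]
-- (the final index is min(hits) ≥ 0, so list indexing via pyGet? is Python's)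
def pvPick (low : String) (table : List (String × List String)) : Option String :=
  let flat := (PySem.List.enumerate (table.map Prod.snd) 0).flatMap
    (fun p => p.2.map (fun kw => (p.1, kw)))
  let hits := (flat.filter (fun p => PySem.Str.isIn p.2 low)).map Prod.fst
  match PySem.List.min? hits (fun x => x) with
  | none => none
  | some best => PySem.List.pyGet? (table.map Prod.fst) best

def categorize_sentence_alt (sentence : String) (sdg_keywords_expanded : List (String × List String)) (paradox_keywords_expanded : List (String × List String)) : Option String × Option String :=
  let low := PySem.Str.lower sentence
  (pvPick low sdg_keywords_expanded, pvPick low paradox_keywords_expanded)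

-- ===== PRECONDITION & SPEC =====
def Spec_categorize_sentence (sentence : String) (sdg_keywords_expanded : List (String × List String)) (paradox_keywords_expanded : List (String × List String)) (out : Option String × Option String) : Prop := out = categorize_sentence_alt sentence sdg_keywords_expanded paradox_keywords_expanded
instance (sentence : String) (sdg_keywords_expanded : List (String × List String)) (paradox_keywords_expanded : List (String × List String)) (out : Option String × Option String) : Decidable (Spec_categorize_sentence sentence sdg_keywords_expanded paradox_keywords_expanded out) := by unfold Spec_categorize_sentence; infer_instance

-- ===== CLAIM (what is proved, stated in full; the proofs are below) =====
def Claim_equal_categorize_sentence : Prop := ∀ (sentence : String) (sdg_keywords_expanded : List (String × List String)) (paradox_keywords_expanded : List (String × List String)), Dom_categorize_sentence sentence sdg_keywords_expanded paradox_keywords_expanded → Spec_categorize_sentence sentence sdg_keywords_expanded paradox_keywords_expanded (categorize_sentence sentence sdg_keywords_expanded paradox_keywords_expanded)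

-- ===== LEMMAS AND PROOFS =====

-- index (0-based) of the first code whose keyword list has a match
def pvFirstIdx (low : String) : List (String × List String) → Option Nat
  | [] => none
  | (_, kws) :: rest =>
      if kws.any (fun kw => PySem.Str.isIn kw low) then some 0
      else (pvFirstIdx low rest).map (· + 1)

-- the hits list of pvPick, with the enumeration starting at s
def pvHits (low : String) (s : Int) (t : List (String × List String)) : List Int :=
  (((PySem.List.enumerate (t.map Prod.snd) s).flatMap
    (fun p => p.2.map (fun kw => (p.1, kw)))).filter
      (fun p => PySem.Str.isIn p.2 low)).map Prod.fst

theorem pvHits_cons (low : String) (s : Int) (c : String) (kws : List String)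
    (t : List (String × List String)) :
    pvHits low s ((c, kws) :: t)
      = (kws.filter (fun kw => PySem.Str.isIn kw low)).map (fun _ => s) ++ pvHits low (s + 1) t := by
  simp [pvHits, PySem.List.enumerate_cons, List.filter_map, List.map_map, Function.comp_def]

theorem pvHits_ge (low : String) (s : Int) (t : List (String × List String)) :
    ∀ x ∈ pvHits low s t, s ≤ x := by
  induction t generalizing s with
  | nil => simp [pvHits]
  | cons hd tl ih =>
      obtain ⟨c, kws⟩ := hd
      intro x hx
      rw [pvHits_cons] at hx
      rcases List.mem_append.1 hx with h | h
      · rcases List.mem_map.1 h with ⟨_, _, rfl⟩; exact le_refl s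
      · have := ih (s + 1) x h; omega

theorem foldl_min_of_ge {a : Int} : ∀ (l : List Int), (∀ x ∈ l, a ≤ x) → l.foldl min a = a := by
  intro l
  induction l generalizing a with
  | nil => intro _; rfl
  | cons x t ih =>
      intro h
      have hx : a ≤ x := h x (List.mem_cons_self)
      have : min a x = a := min_eq_left hx
      simp only [List.foldl_cons, this]
      exact ih (fun y hy => h y (List.mem_cons_of_mem _ hy))

theorem foldl_min_eq_of_mem {s : Int} : ∀ (l : List Int) (y : Int), s ≤ y → (∀ x ∈ l, s ≤ x) → s ∈ y :: l → l.foldl min y = s := by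
  intro l
  induction l with
  | nil =>
      intro y hy _ hmem
      simp only [List.mem_cons, List.not_mem_nil, or_false] at hmem
      simp [hmem]
  | cons z zs ih =>
      intro y hy hl hmem
      have hz : s ≤ z := hl z List.mem_cons_self
      have hzs : ∀ x ∈ zs, s ≤ x := fun x hx => hl x (List.mem_cons_of_mem _ hx)
      simp only [List.foldl_cons]
      by_cases hin : s ∈ zs
      · exact ih (min y z) (le_min hy hz) hzs (List.mem_cons_of_mem _ hin)
      · have : s = y ∨ s = z := by
          rcases List.mem_cons.1 hmem with h | h
          · exact Or.inl h
          · rcases List.mem_cons.1 h with h | h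
            · exact Or.inr h
            · exact absurd h hin
        have hmin : min y z = s := by rcases this with rfl | rfl <;> omega
        rw [hmin]
        exact foldl_min_of_ge zs hzs

theorem min?_pvHits (low : String) (s : Int) (t : List (String × List String)) :
    PySem.List.min? (pvHits low s t) (fun x => x)
      = (pvFirstIdx low t).map (fun k => s + (k : Int)) := by
  induction t generalizing s with
  | nil => simp [pvHits, pvFirstIdx, PySem.List.min?]
  | cons hd tl ih =>
      obtain ⟨c, kws⟩ := hd
      cases hk : kws.any (fun kw => PySem.Str.isIn kw low) with
      | true =>
          obtain ⟨kw0, hkw0, hkw0m⟩ := List.any_eq_true.1 hk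
          have hmem : kw0 ∈ kws.filter (fun kw => PySem.Str.isIn kw low) :=
            List.mem_filter.2 ⟨hkw0, hkw0m⟩
          have hlist : pvHits low s ((c, kws) :: tl)
              = (kws.filter (fun kw => PySem.Str.isIn kw low)).map (fun _ => s) ++ pvHits low (s + 1) tl :=
            pvHits_cons low s c kws tl
          have hge : ∀ x ∈ pvHits low s ((c, kws) :: tl), s ≤ x := pvHits_ge low s _
          have hsmem : s ∈ pvHits low s ((c, kws) :: tl) := by
            rw [hlist]
            exact List.mem_append_left _ (List.mem_map.2 ⟨kw0, hmem, rfl⟩)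
          cases hcase : pvHits low s ((c, kws) :: tl) with
          | nil => rw [hcase] at hsmem; exact absurd hsmem (List.not_mem_nil)
          | cons y ys =>
              rw [hcase] at hge hsmem
              rw [PySem.List.min?_id_cons]
              simp only [pvFirstIdx, hk, if_true]
              have hres : ys.foldl min y = s :=
                foldl_min_eq_of_mem ys y (hge y List.mem_cons_self)
                  (fun x hx => hge x (List.mem_cons_of_mem _ hx)) hsmem
              rw [hres]
              norm_num
      | false =>
          have hfilter : kws.filter (fun kw => PySem.Str.isIn kw low) = [] := by
            rw [List.filter_eq_nil_iff]
            intro kw hkw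
            have := List.any_eq_false.1 hk kw hkw
            simpa using this
          rw [pvHits_cons, hfilter]
          simp only [List.map_nil, List.nil_append]
          rw [ih (s + 1)]
          simp only [pvFirstIdx, hk, Bool.false_eq_true, if_false]
          cases pvFirstIdx low tl with
          | none => rfl
          | some k => simp; ring

theorem pvLoopA_eq_firstIdx (sentence : String) (t : List (String × List String)) :
    pvLoopA sentence t
      = (pvFirstIdx (PySem.Str.lower sentence) t).bind (fun k => (t.map Prod.fst)[k]?) := by
  induction t with
  | nil => rfl
  | cons hd tl ih =>
      obtain ⟨c, kws⟩ := hd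
      simp only [pvLoopA, pvFirstIdx]
      split
      · simp
      · rw [ih]
        cases pvFirstIdx (PySem.Str.lower sentence) tl with
        | none => rfl
        | some k => simp

theorem pvLoopA_eq_pvPick (sentence : String) (t : List (String × List String)) :
    pvLoopA sentence t = pvPick (PySem.Str.lower sentence) t := by
  rw [pvLoopA_eq_firstIdx]
  show _ = (match PySem.List.min? (pvHits (PySem.Str.lower sentence) 0 t) (fun x => x) with
    | none => none
    | some best => PySem.List.pyGet? (t.map Prod.fst) best)
  rw [min?_pvHits]
  cases hf : pvFirstIdx (PySem.Str.lower sentence) t with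
  | none => rfl
  | some k => simp

-- ===== VERDICT (by name: the statement is the Claim_ definition above) =====
theorem categorize_sentence_spec : Claim_equal_categorize_sentence := by
  intro sentence d1 d2 _
  unfold Spec_categorize_sentence categorize_sentence categorize_sentence_alt
  rw [pvLoopA_eq_pvPick, pvLoopA_eq_pvPick]
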